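-- pv_equiv track=rewrite | github.com/Dmitry315/telegram_bot | telegram_bot.py | clean_number
-- ===== SOURCE A (Python) =====
-- digits = list('0123456789')
--
-- def clean_number(number):
--     flag = True
--     clean = ''
--     for lit in number.replace('+7', '8'):
--         if lit in digits:
--             flag = False
--             clean += lit
--         else:
--             if flag:
--                 clean += lit
--     return clean
-- ===== SOURCE B (Python) =====
-- digits = list('0123456789')
--
-- def clean_number(number):
--     s = number.replace('+7', '8')
--     idx = next((i for i, c in enumerate(s) if c in digits), len(s))
--     return s[:idx] + ''.join(c for c in s if c in digits)
-- ===== Notes on version B (the rewrite author's own statement) =====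
-- stated objective: simpler
-- what changed: Replaced A's single flag-driven accumulating loop by two independent passes: find the index of the first digit (the leading non-digit prefix) and concatenate it with a digit filter of the whole string.
import Mathlib
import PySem

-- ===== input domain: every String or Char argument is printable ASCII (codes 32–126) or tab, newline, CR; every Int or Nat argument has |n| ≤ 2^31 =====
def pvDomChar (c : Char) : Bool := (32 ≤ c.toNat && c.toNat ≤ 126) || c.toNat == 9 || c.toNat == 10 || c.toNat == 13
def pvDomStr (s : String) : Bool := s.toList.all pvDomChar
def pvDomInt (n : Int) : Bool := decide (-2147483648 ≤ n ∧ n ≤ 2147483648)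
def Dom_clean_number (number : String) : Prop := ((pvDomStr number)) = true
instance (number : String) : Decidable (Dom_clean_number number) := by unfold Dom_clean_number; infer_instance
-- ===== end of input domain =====

-- B is a two-pass decomposition of A's flag-driven loop; same O(n) cost, plainer structure.

-- ===== PORT A =====
-- digits = list('0123456789')
def pvDigits : List Char := "0123456789".toList

-- flag/clean loop over number.replace('+7','8')
def clean_number (number : String) : String :=
  let r := (PySem.Str.replace number "+7" "8").toList.foldl
    (fun (st : Bool × List Char) lit =>
      if pvDigits.contains lit then (false, st.2 ++ [lit])
      else if st.1 then (st.1, st.2 ++ [lit]) else st)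
    (true, [])
  String.mk r.2

-- ===== PORT B =====
def clean_number_alt (number : String) : String :=
  let s := (PySem.Str.replace number "+7" "8").toList
  let idx := (s.findIdx? (fun c => pvDigits.contains c)).getD s.length
  String.mk (s.take idx ++ s.filter (fun c => pvDigits.contains c))

-- ===== PRECONDITION & SPEC =====
def Spec_clean_number (number : String) (out : String) : Prop := out = clean_number_alt number
instance (number : String) (out : String) : Decidable (Spec_clean_number number out) := by unfold Spec_clean_number; infer_instance

-- ===== CLAIM (what is proved, stated in full; the proofs are below) =====
def Claim_equal_clean_number : Prop := ∀ (number : String), Dom_clean_number number → Spec_clean_number number (clean_number number)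

-- ===== LEMMAS AND PROOFS =====

-- A's loop once the flag is False: it just appends every digit (a filter).

theorem pv_loop_false (cs : List Char) (acc : List Char) :
    cs.foldl (fun (st : Bool × List Char) lit =>
      if pvDigits.contains lit then (false, st.2 ++ [lit])
      else if st.1 then (st.1, st.2 ++ [lit]) else st) (false, acc)
    = (false, acc ++ cs.filter (fun c => pvDigits.contains c)) := by
  induction cs generalizing acc with
  | nil => simp
  | cons c cs ih =>
    rw [List.foldl_cons, List.filter_cons]
    by_cases h : pvDigits.contains c = true
    · rw [if_pos h, if_pos h, ih, List.append_assoc]; rfl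
    · rw [if_neg h, if_neg h, if_neg (by simp : ¬((false, acc).1 = true)), ih]

-- A's loop with the flag still True: leading non-digits pass through, then filter.
theorem pv_loop_true (cs : List Char) (acc : List Char) :
    (cs.foldl (fun (st : Bool × List Char) lit =>
      if pvDigits.contains lit then (false, st.2 ++ [lit])
      else if st.1 then (st.1, st.2 ++ [lit]) else st) (true, acc)).2
    = acc ++ cs.takeWhile (fun c => !pvDigits.contains c)
          ++ cs.filter (fun c => pvDigits.contains c) := by
  induction cs generalizing acc with
  | nil => simp
  | cons c cs ih =>
    rw [List.foldl_cons, List.takeWhile_cons, List.filter_cons]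
    by_cases h : pvDigits.contains c = true
    · rw [if_pos h, if_pos h, pv_loop_false, h]
      simp [List.append_assoc]
    · rw [if_neg h, if_neg h, if_pos (rfl : (true, acc ++ [c]).1 = true), ih,
        (by simpa using h : pvDigits.contains c = false)]
      simp [List.append_assoc]

-- B's take-to-first-digit prefix is exactly the takeWhile-non-digit prefix.
theorem pv_take_findIdx (p : Char → Bool) (cs : List Char) :
    cs.take ((cs.findIdx? p).getD cs.length) = cs.takeWhile (fun c => !p c) := by
  induction cs with
  | nil => simp
  | cons c cs ih =>
    by_cases h : p c = true
    · simp [List.findIdx?_cons, h]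
    · cases hf : cs.findIdx? p with
      | none => rw [hf] at ih; simpa [List.findIdx?_cons, h, hf] using ih
      | some i => rw [hf] at ih; simpa [List.findIdx?_cons, h, hf, List.take_succ_cons] using ih

-- ===== VERDICT (by name: the statement is the Claim_ definition above) =====
theorem clean_number_spec : Claim_equal_clean_number := by
  intro number _
  unfold Spec_clean_number clean_number clean_number_alt
  simp only [pv_loop_true, pv_take_findIdx, List.nil_append]
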